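-- pv_equiv track=rewrite | github.com/kimjjing1004/Python_Programmers | 2022-06-18/시저암호/solution1_피드백5.py | space
-- ===== SOURCE A (Python) =====
-- def spell(s, n):
--     answer = 0
--     result = ''
--
--     for i in range(len(s)):
--         answer = ord(s[i])
--
--         if answer > 96 and answer < 123:
--             answer = answer + n
--             if answer > 122:
--                 answer = answer - 26
--
--         if answer > 64 and answer < 91:
--             answer = answer + n
--             if answer > 90:
--                 answer = answer - 26
--
--         result += chr(answer)
--
--     return result
--
-- def space(s, n):
--     answer = 0
--     total = spell(s, n)
--     s = list(s)
--
--     for i in range(len(s)):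
--         answer = ord(s[i])
--
--         if answer == 32:
--             total += s[i]
--             continue
--
--     return total
-- ===== SOURCE B (Python) =====
-- def space(s, n):
--     out = []
--     spaces = 0
--     for ch in s:
--         c = ord(ch)
--         if 96 < c < 123:
--             c += n
--             if c > 122:
--                 c -= 26
--         if 64 < c < 91:
--             c += n
--             if c > 90:
--                 c -= 26
--         out.append(chr(c))
--         if ch == ' ':
--             spaces += 1
--     return ''.join(out) + ' ' * spaces
-- ===== Notes on version B (the rewrite author's own statement) =====
-- stated objective: simpler
-- what changed: B replaces A's two passes (a spell helper building the ciphered string, then a second scan re-appending every space) by one loop that shifts each character and counts spaces, returning the buffer plus ' ' * spaces.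
-- outside the precondition, e.g. on space('a', -66): A returns '\x1f', B returns '\x1f'; on space('a', 60000): A returns '\ueaa7', B returns '\ueaa7'; on space('A', -66): A raises ValueError, B raises ValueError
import Mathlib
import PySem

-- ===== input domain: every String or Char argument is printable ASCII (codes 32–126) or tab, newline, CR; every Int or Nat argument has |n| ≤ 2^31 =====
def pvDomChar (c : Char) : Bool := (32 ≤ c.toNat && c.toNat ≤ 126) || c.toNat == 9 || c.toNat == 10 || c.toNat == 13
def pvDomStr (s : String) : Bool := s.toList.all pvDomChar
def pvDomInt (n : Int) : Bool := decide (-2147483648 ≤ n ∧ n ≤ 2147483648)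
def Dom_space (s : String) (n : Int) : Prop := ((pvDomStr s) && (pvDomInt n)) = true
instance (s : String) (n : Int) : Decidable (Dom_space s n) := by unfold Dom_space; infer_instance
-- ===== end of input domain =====

-- B merges A's two passes (spell helper + space-reappending scan) into one loop with a
-- space counter; return-value equivalence on Pre_ (simpler decomposition, no speed claim).

-- Python's chr(i); exact whenever 0 ≤ i < 0xD800, which Pre_space guarantees for every
-- code either port feeds it.
def pyChr (i : Int) : Char := Char.ofNat i.toNat

-- ===== PORT A =====
def spellStep (n : Int) (result : List Char) (ch : Char) : List Char :=
  let answer : Int := ch.toNat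
  let answer := if 96 < answer ∧ answer < 123 then
      let answer := answer + n
      if answer > 122 then answer - 26 else answer
    else answer
  let answer := if 64 < answer ∧ answer < 91 then
      let answer := answer + n
      if answer > 90 then answer - 26 else answer
    else answer
  result ++ [pyChr answer]

def spell (s : String) (n : Int) : String :=
  String.ofList (s.toList.foldl (spellStep n) [])

def spaceStep (total : List Char) (c : Char) : List Char :=
  if (c.toNat : Int) = 32 then total ++ [c] else total

def space (s : String) (n : Int) : String :=
  let total := spell s n
  String.ofList (s.toList.foldl spaceStep total.toList)

-- ===== PORT B =====
def altStep (n : Int) (acc : List Char × Nat) (ch : Char) : List Char × Nat :=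
  let c : Int := ch.toNat
  let c := if 96 < c ∧ c < 123 then
      let c := c + n
      if c > 122 then c - 26 else c
    else c
  let c := if 64 < c ∧ c < 91 then
      let c := c + n
      if c > 90 then c - 26 else c
    else c
  (acc.1 ++ [pyChr c], if ch = ' ' then acc.2 + 1 else acc.2)

def space_alt (s : String) (n : Int) : String :=
  let st := s.toList.foldl (altStep n) ([], 0)
  String.ofList (st.1 ++ List.replicate st.2 ' ')

-- ===== PRECONDITION & SPEC =====
-- Pre_ excludes shift amounts with which Python's chr raises ValueError on some letter or
-- yields a code in the surrogate range (unrepresentable as a Lean Char); the bound is uniform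
-- over all letters, so some letter/shift pairs that A happens to survive are excluded too.
def Pre_space (s : String) (n : Int) : Prop :=
  (s.toList.all (fun c =>
      !((96 < c.toNat && c.toNat < 123) || (64 < c.toNat && c.toNat < 91))) = true)
  ∨ (-65 ≤ n ∧ n ≤ 55199)
instance (s : String) (n : Int) : Decidable (Pre_space s n) := by unfold Pre_space; infer_instance
def pvWitness_space : String × Int := ("Hello World", 3)

def Spec_space (s : String) (n : Int) (out : String) : Prop := out = space_alt s n
instance (s : String) (n : Int) (out : String) : Decidable (Spec_space s n out) := by unfold Spec_space; infer_instance

-- ===== CLAIM (what is proved, stated in full; the proofs are below) =====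
def Claim_equal_space : Prop := ∀ (s : String) (n : Int), Dom_space s n → Pre_space s n → Spec_space s n (space s n)

-- ===== LEMMAS AND PROOFS =====
-- the per-character shift, abstracted for the proofs
def shiftC (n : Int) (ch : Char) : Char :=
  let c : Int := ch.toNat
  let c := if 96 < c ∧ c < 123 then
      let c := c + n
      if c > 122 then c - 26 else c
    else c
  let c := if 64 < c ∧ c < 91 then
      let c := c + n
      if c > 90 then c - 26 else c
    else c
  pyChr c

lemma spellStep_eq (n : Int) (r : List Char) (ch : Char) :
    spellStep n r ch = r ++ [shiftC n ch] := rfl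

lemma foldl_spellStep (n : Int) (l : List Char) :
    ∀ acc, l.foldl (spellStep n) acc = acc ++ l.map (shiftC n) := by
  induction l with
  | nil => simp
  | cons c l ih => intro acc; simp [List.foldl, spellStep_eq, ih]

lemma toNat_eq_32_iff (c : Char) : (c.toNat : Int) = 32 ↔ c = ' ' := by
  constructor
  · intro h
    have h1 : c.toNat = 32 := by exact_mod_cast h
    have h2 : c.val = (' ' : Char).val := by
      apply UInt32.toNat_inj.mp
      simpa using h1
    exact Char.ext h2
  · intro h; subst h; decide

lemma foldl_spaceStep (l : List Char) :
    ∀ acc, l.foldl spaceStep acc = acc ++ List.replicate (l.count ' ') ' ' := by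
  induction l with
  | nil => simp
  | cons c l ih =>
    intro acc
    by_cases hc : c = ' '
    · subst hc
      simp [List.foldl, spaceStep, ih]
      rw [← List.replicate_succ, List.replicate_succ']
    · have h32 : ¬ ((c.toNat : Int) = 32) := fun h => hc ((toNat_eq_32_iff c).mp h)
      simp [List.foldl, spaceStep, h32, ih, hc]

lemma altStep_eq (n : Int) (acc : List Char × Nat) (ch : Char) :
    altStep n acc ch = (acc.1 ++ [shiftC n ch], if ch = ' ' then acc.2 + 1 else acc.2) := rfl

lemma foldl_altStep (n : Int) (l : List Char) :
    ∀ acc : List Char × Nat,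
      l.foldl (altStep n) acc = (acc.1 ++ l.map (shiftC n), acc.2 + l.count ' ') := by
  induction l with
  | nil => simp
  | cons c l ih =>
    intro acc
    by_cases hc : c = ' ' <;> simp [List.foldl, altStep_eq, ih, hc] <;> omega

-- ===== VERDICT (by name: the statement is the Claim_ definition above) =====
theorem space_spec : Claim_equal_space := by
  intro s n _ _
  unfold Spec_space space space_alt spell
  simp only [String.toList_ofList, foldl_spellStep, foldl_spaceStep, foldl_altStep]
  simp
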